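-- pv_equiv track=rewrite | github.com/Acdimy/CVBE | V2/dev/tools.py | dd_ref_or
-- ===== SOURCE A (Python) =====
-- def dd_ref_or(reflist):
--     res_ref = reflist[0]
--     if len(reflist) == 1:
--         return res_ref
--     else:
--         for ref in reflist[1:]:
--             res_ref = res_ref | ref
--         return res_ref
-- ===== SOURCE B (Python) =====
-- def dd_ref_or(reflist):
--     if len(reflist) <= 1:
--         return reflist[0]
--     m = len(reflist) // 2
--     return dd_ref_or(reflist[:m]) | dd_ref_or(reflist[m:])
-- ===== Notes on version B (the rewrite author's own statement) =====
-- stated objective: alternative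
-- what changed: Replaces the linear left-to-right fold of | with a balanced divide-and-conquer recursion that ORs the two halves of the list.
import Mathlib
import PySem

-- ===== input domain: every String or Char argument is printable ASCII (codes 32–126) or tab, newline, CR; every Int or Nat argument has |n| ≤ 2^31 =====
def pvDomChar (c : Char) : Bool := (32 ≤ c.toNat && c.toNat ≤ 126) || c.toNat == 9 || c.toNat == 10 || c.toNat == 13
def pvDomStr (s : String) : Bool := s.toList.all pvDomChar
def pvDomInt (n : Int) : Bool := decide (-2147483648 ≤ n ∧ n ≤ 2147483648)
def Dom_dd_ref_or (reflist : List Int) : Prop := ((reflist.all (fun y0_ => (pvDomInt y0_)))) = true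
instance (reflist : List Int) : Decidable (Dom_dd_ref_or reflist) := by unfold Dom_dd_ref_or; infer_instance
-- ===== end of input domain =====

-- B replaces A's linear left fold of `|` by a balanced divide-and-conquer OR of the two halves (alternative decomposition; same result by associativity of bitwise or).


-- ===== PORT A =====
-- res_ref = reflist[0]; if len(reflist) == 1 return it; else fold `|` over reflist[1:]
def dd_ref_or (reflist : List Int) : Int :=
  match reflist with
  | [] => 0  -- Python raises IndexError here; excluded by Pre_dd_ref_or
  | r :: rest =>
    if reflist.length = 1 then r
    else rest.foldl (fun a b => PySem.Int.bor a b) r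

-- ===== PORT B =====
-- if len(reflist) <= 1: return reflist[0]; else OR of recursive calls on the two halves
def dd_ref_or_alt (reflist : List Int) : Int :=
  if h : reflist.length ≤ 1 then
    reflist.headD 0  -- reflist[0]; Python raises IndexError on [], excluded by Pre_dd_ref_or
  else
    let m := reflist.length / 2
    PySem.Int.bor (dd_ref_or_alt (reflist.take m)) (dd_ref_or_alt (reflist.drop m))
termination_by reflist.length
decreasing_by
  · exact Nat.lt_of_le_of_lt (List.length_take_le _ _)
      (Nat.div_lt_self (Nat.lt_trans Nat.zero_lt_one (Nat.lt_of_not_le h)) Nat.one_lt_two)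
  · rw [List.length_drop]
    exact Nat.sub_lt (Nat.lt_trans Nat.zero_lt_one (Nat.lt_of_not_le h))
      (Nat.div_pos (Nat.succ_le_of_lt (Nat.lt_of_not_le h)) Nat.zero_lt_two)

-- ===== PRECONDITION & SPEC =====
-- Pre_ excludes only the empty list, on which Python A raises IndexError (reflist[0]).
def Pre_dd_ref_or (reflist : List Int) : Prop := reflist ≠ []
instance (reflist : List Int) : Decidable (Pre_dd_ref_or reflist) := by unfold Pre_dd_ref_or; infer_instance
def pvWitness_dd_ref_or : List Int := ([3, 5, 12])

def Spec_dd_ref_or (reflist : List Int) (out : Int) : Prop := out = dd_ref_or_alt reflist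
instance (reflist : List Int) (out : Int) : Decidable (Spec_dd_ref_or reflist out) := by unfold Spec_dd_ref_or; infer_instance

-- ===== CLAIM (what is proved, stated in full; the proofs are below) =====
def Claim_equal_dd_ref_or : Prop := ∀ (reflist : List Int), Dom_dd_ref_or reflist → Pre_dd_ref_or reflist → Spec_dd_ref_or reflist (dd_ref_or reflist)

-- ===== LEMMAS AND PROOFS =====

-- Nat-level helper: m - (m &&& n) (the complement-side combination PySem.Int.bor uses for mixed signs)
def pvS (m n : Nat) : Nat := m - (m &&& n)

theorem pvS_testBit (m : Nat) : ∀ (n k : Nat), (pvS m n).testBit k = (m.testBit k && !(n.testBit k)) := by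
  induction m using Nat.strong_induction_on with
  | _ m ih =>
    intro n k
    rcases Nat.eq_zero_or_pos m with hm | hm
    · subst hm; simp [pvS]
    · have hd : (m &&& n) / 2 = m / 2 &&& n / 2 := Nat.and_div_two
      have hle : m &&& n ≤ m := Nat.and_le_left
      have hle2 : m / 2 &&& n / 2 ≤ m / 2 := Nat.and_le_left
      have hA1 : (m &&& n) % 2 = 1 ↔ (m % 2 = 1 ∧ n % 2 = 1) := by
        rw [Nat.mod_two_eq_one_iff_testBit_zero, Nat.mod_two_eq_one_iff_testBit_zero,
            Nat.mod_two_eq_one_iff_testBit_zero, Nat.testBit_and]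
        simp
      have hp : (m &&& n) % 2 ≤ m % 2 := by
        rcases Nat.mod_two_eq_zero_or_one m with h | h
        · have hA : (m &&& n) % 2 ≠ 1 := fun hh => by have := (hA1.mp hh).1; omega
          omega
        · omega
      have key : pvS m n = 2 * (m / 2 - (m / 2 &&& n / 2)) + (m % 2 - (m &&& n) % 2) := by
        simp only [pvS]
        omega
      have key' : pvS m n = 2 * pvS (m / 2) (n / 2) + (m % 2 - (m &&& n) % 2) := by
        simp only [pvS]; omega
      cases k with
      | zero =>
        rw [Nat.testBit_zero, Nat.testBit_zero, Nat.testBit_zero]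
        have hmod : pvS m n % 2 = m % 2 - (m &&& n) % 2 := by rw [key']; omega
        rcases Nat.mod_two_eq_zero_or_one (m &&& n) with hA | hA <;>
        rcases Nat.mod_two_eq_zero_or_one m with hb | hb <;>
        rcases Nat.mod_two_eq_zero_or_one n with hc | hc <;>
          simp [hA, hb, hc] at hA1 ⊢ <;> omega
      | succ k =>
        rw [Nat.testBit_add_one, Nat.testBit_add_one, Nat.testBit_add_one]
        have hdiv : pvS m n / 2 = pvS (m / 2) (n / 2) := by
          obtain ⟨x, hx⟩ : ∃ x, pvS (m / 2) (n / 2) = x := ⟨_, rfl⟩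
          rw [hx] at key' ⊢
          omega
        rw [hdiv]
        exact ih (m / 2) (Nat.div_lt_self hm (by omega)) (n / 2) k

theorem pvS_or (r p q : Nat) : pvS r (p ||| q) = pvS (pvS r q) p := by
  apply Nat.eq_of_testBit_eq; intro k
  simp only [pvS_testBit, Nat.testBit_or]
  cases r.testBit k <;> cases p.testBit k <;> cases q.testBit k <;> rfl

theorem pvS_comm (n p r : Nat) : pvS (pvS n p) r = pvS (pvS n r) p := by
  apply Nat.eq_of_testBit_eq; intro k
  simp only [pvS_testBit]
  cases n.testBit k <;> cases p.testBit k <;> cases r.testBit k <;> rfl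

theorem pvS_and_left (n p r : Nat) : pvS n p &&& r = pvS (n &&& r) p := by
  apply Nat.eq_of_testBit_eq; intro k
  simp only [pvS_testBit, Nat.testBit_and]
  cases n.testBit k <;> cases p.testBit k <;> cases r.testBit k <;> rfl

theorem pvS_and_mid (m q r : Nat) : pvS m q &&& r = m &&& pvS r q := by
  apply Nat.eq_of_testBit_eq; intro k
  simp only [pvS_testBit, Nat.testBit_and]
  cases m.testBit k <;> cases q.testBit k <;> cases r.testBit k <;> rfl

theorem pvS_and_right (m n r : Nat) : pvS (m &&& n) r = m &&& pvS n r := by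
  apply Nat.eq_of_testBit_eq; intro k
  simp only [pvS_testBit, Nat.testBit_and]
  cases m.testBit k <;> cases n.testBit k <;> cases r.testBit k <;> rfl

-- sign-case formulas of PySem.Int.bor
theorem bor_pn {a b : Int} (ha : 0 ≤ a) (hb : b < 0) :
    PySem.Int.bor a b = -(↑(pvS (-b - 1).toNat a.toNat)) - 1 := by
  simp only [PySem.Int.bor, pvS]
  rw [if_pos ha, if_neg (by omega : ¬ 0 ≤ b)]

theorem bor_np {a b : Int} (ha : a < 0) (hb : 0 ≤ b) :
    PySem.Int.bor a b = -(↑(pvS (-a - 1).toNat b.toNat)) - 1 := by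
  simp only [PySem.Int.bor, pvS]
  rw [if_neg (by omega : ¬ 0 ≤ a), if_pos hb]

theorem bor_nn {a b : Int} (ha : a < 0) (hb : b < 0) :
    PySem.Int.bor a b = -(↑((-a - 1).toNat &&& (-b - 1).toNat)) - 1 := by
  simp only [PySem.Int.bor]
  rw [if_neg (by omega : ¬ 0 ≤ a), if_neg (by omega : ¬ 0 ≤ b)]

theorem bor_assoc (a b c : Int) :
    PySem.Int.bor (PySem.Int.bor a b) c = PySem.Int.bor a (PySem.Int.bor b c) := by
  by_cases ha : 0 ≤ a <;> by_cases hb : 0 ≤ b <;> by_cases hc : 0 ≤ c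
  · -- + + +
    rw [PySem.Int.bor_of_nonneg ha hb, PySem.Int.bor_of_nonneg hb hc,
        PySem.Int.bor_of_nonneg (Int.natCast_nonneg _) hc,
        PySem.Int.bor_of_nonneg ha (Int.natCast_nonneg _)]
    simp only [Int.toNat_natCast]
    exact congrArg _ (Nat.or_assoc _ _ _)
  · -- + + -
    have hc' : c < 0 := by omega
    rw [PySem.Int.bor_of_nonneg ha hb, bor_pn hb hc',
        bor_pn (Int.natCast_nonneg _) hc', bor_pn ha (by omega)]
    simp only [Int.toNat_natCast]
    have h1 : (-(-(↑(pvS (-c - 1).toNat b.toNat) : Int) - 1) - 1).toNat = pvS (-c - 1).toNat b.toNat := by omega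
    rw [h1, pvS_or]
  · -- + - +
    have hb' : b < 0 := by omega
    rw [bor_pn ha hb', bor_np hb' hc,
        bor_np (by omega) hc, bor_pn ha (by omega)]
    have h1 : (-(-(↑(pvS (-b - 1).toNat a.toNat) : Int) - 1) - 1).toNat = pvS (-b - 1).toNat a.toNat := by omega
    have h2 : (-(-(↑(pvS (-b - 1).toNat c.toNat) : Int) - 1) - 1).toNat = pvS (-b - 1).toNat c.toNat := by omega
    rw [h1, h2, pvS_comm]
  · -- + - -
    have hb' : b < 0 := by omega
    have hc' : c < 0 := by omega
    rw [bor_pn ha hb', bor_nn hb' hc',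
        bor_nn (by omega) hc', bor_pn ha (by omega)]
    have h1 : (-(-(↑(pvS (-b - 1).toNat a.toNat) : Int) - 1) - 1).toNat = pvS (-b - 1).toNat a.toNat := by omega
    have h2 : (-(-(↑((-b - 1).toNat &&& (-c - 1).toNat) : Int) - 1) - 1).toNat = (-b - 1).toNat &&& (-c - 1).toNat := by omega
    rw [h1, h2, pvS_and_left]
  · -- - + +
    have ha' : a < 0 := by omega
    rw [bor_np ha' hb, PySem.Int.bor_of_nonneg hb hc,
        bor_np (by omega) hc, bor_np ha' (Int.natCast_nonneg _)]
    simp only [Int.toNat_natCast]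
    have h1 : (-(-(↑(pvS (-a - 1).toNat b.toNat) : Int) - 1) - 1).toNat = pvS (-a - 1).toNat b.toNat := by omega
    rw [h1, pvS_or, pvS_comm]
  · -- - + -
    have ha' : a < 0 := by omega
    have hc' : c < 0 := by omega
    rw [bor_np ha' hb, bor_pn hb hc',
        bor_nn (by omega) hc', bor_nn ha' (by omega)]
    have h1 : (-(-(↑(pvS (-a - 1).toNat b.toNat) : Int) - 1) - 1).toNat = pvS (-a - 1).toNat b.toNat := by omega
    have h2 : (-(-(↑(pvS (-c - 1).toNat b.toNat) : Int) - 1) - 1).toNat = pvS (-c - 1).toNat b.toNat := by omega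
    rw [h1, h2, pvS_and_mid]
  · -- - - +
    have ha' : a < 0 := by omega
    have hb' : b < 0 := by omega
    rw [bor_nn ha' hb', bor_np hb' hc,
        bor_np (by omega) hc, bor_nn ha' (by omega)]
    have h1 : (-(-(↑((-a - 1).toNat &&& (-b - 1).toNat) : Int) - 1) - 1).toNat = (-a - 1).toNat &&& (-b - 1).toNat := by omega
    have h2 : (-(-(↑(pvS (-b - 1).toNat c.toNat) : Int) - 1) - 1).toNat = pvS (-b - 1).toNat c.toNat := by omega
    rw [h1, h2, pvS_and_right]
  · -- - - -
    have ha' : a < 0 := by omega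
    have hb' : b < 0 := by omega
    have hc' : c < 0 := by omega
    rw [bor_nn ha' hb', bor_nn hb' hc',
        bor_nn (by omega) hc', bor_nn ha' (by omega)]
    have h1 : (-(-(↑((-a - 1).toNat &&& (-b - 1).toNat) : Int) - 1) - 1).toNat = (-a - 1).toNat &&& (-b - 1).toNat := by omega
    have h2 : (-(-(↑((-b - 1).toNat &&& (-c - 1).toNat) : Int) - 1) - 1).toNat = (-b - 1).toNat &&& (-c - 1).toNat := by omega
    rw [h1, h2, Nat.and_assoc]

-- seed-extraction for the OR fold (the fold shape of these two programs)
theorem foldl_or_seed (l : List Int) (a : Int) : ∀ b : Int,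
    l.foldl (fun x y => PySem.Int.bor x y) (PySem.Int.bor a b)
      = PySem.Int.bor a (l.foldl (fun x y => PySem.Int.bor x y) b) := by
  induction l with
  | nil => intro b; rfl
  | cons c t ih => intro b; simp only [List.foldl_cons, bor_assoc, ih]

-- A on a nonempty list is the plain left fold (the len == 1 branch coincides with it)
theorem dd_ref_or_cons (r : Int) (rest : List Int) :
    dd_ref_or (r :: rest) = rest.foldl (fun a b => PySem.Int.bor a b) r := by
  cases rest <;> simp [dd_ref_or, List.length_cons]

-- the fold merges across an append of two nonempty pieces
theorem fold_append (x y : Int) (xs ys : List Int) :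
    (xs ++ y :: ys).foldl (fun a b => PySem.Int.bor a b) x
      = PySem.Int.bor (xs.foldl (fun a b => PySem.Int.bor a b) x)
          (ys.foldl (fun a b => PySem.Int.bor a b) y) := by
  rw [List.foldl_append, List.foldl_cons, ← foldl_or_seed]

-- B computes the same left fold on every nonempty list (strong induction on length)
theorem alt_eq_fold (n : Nat) : ∀ (reflist : List Int), reflist ≠ [] → reflist.length = n →
    dd_ref_or_alt reflist = dd_ref_or reflist := by
  induction n using Nat.strong_induction_on with
  | _ n ih =>
    intro reflist h hn
    obtain ⟨r, rest, rfl⟩ := List.exists_cons_of_ne_nil h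
    · rw [dd_ref_or_alt]
      by_cases h1 : (r :: rest).length ≤ 1
      · have hrest : rest = [] := by
          cases rest with
          | nil => rfl
          | cons a t => simp at h1
        subst hrest
        simp [dd_ref_or]
      · simp only [dif_neg h1]
        have hlen : 2 ≤ (r :: rest).length := by
          simp only [List.length_cons] at h1 ⊢; omega
        have hm1 : 1 ≤ (r :: rest).length / 2 := by omega
        have hmlt : (r :: rest).length / 2 < (r :: rest).length := by omega
        have hlt : ((r :: rest).take ((r :: rest).length / 2)).length = (r :: rest).length / 2 := by
          rw [List.length_take]; omega
        have hld : ((r :: rest).drop ((r :: rest).length / 2)).length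
            = (r :: rest).length - (r :: rest).length / 2 := by
          rw [List.length_drop]
        have htne : (r :: rest).take ((r :: rest).length / 2) ≠ [] := by
          intro hcon; rw [hcon] at hlt; simp only [List.length_nil] at hlt; omega
        have hdne : (r :: rest).drop ((r :: rest).length / 2) ≠ [] := by
          intro hcon; rw [hcon] at hld; simp only [List.length_nil] at hld; omega
        have hn1 : ((r :: rest).take ((r :: rest).length / 2)).length < n := by
          rw [hlt, ← hn]; exact hmlt
        have hn2 : ((r :: rest).drop ((r :: rest).length / 2)).length < n := by
          rw [hld, ← hn]
          obtain ⟨L, hL⟩ : ∃ L, (r :: rest).length = L := ⟨_, rfl⟩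
          rw [hL] at hm1 ⊢
          omega
        rw [ih _ hn1 _ htne rfl, ih _ hn2 _ hdne rfl]
        obtain ⟨a, as, hta⟩ := List.exists_cons_of_ne_nil htne
        obtain ⟨b, bs, htb⟩ := List.exists_cons_of_ne_nil hdne
        have happ : r :: rest = (a :: as) ++ b :: bs := by
          rw [← hta, ← htb, List.take_append_drop]
        rw [hta, htb, dd_ref_or_cons, dd_ref_or_cons, ← fold_append]
        have hsplit : r :: rest = a :: (as ++ b :: bs) := by simpa using happ
        conv_rhs => rw [hsplit]
        rw [dd_ref_or_cons]

-- ===== VERDICT (by name: the statement is the Claim_ definition above) =====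
theorem dd_ref_or_spec : Claim_equal_dd_ref_or := by
  intro reflist _ hpre
  unfold Spec_dd_ref_or
  exact (alt_eq_fold reflist.length reflist hpre rfl).symm
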